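-- pv_equiv track=rewrite | github.com/hoidn/nanoBragg | docs/templates/improved_c_reference_utils.py | format_command_for_logging
-- ===== SOURCE A (Python) =====
-- from typing import List, Dict, Any, Tuple, Optional
--
-- def format_command_for_logging(cmd: List[str]) -> str:
--     """Format command for clear logging and debugging."""
--
--     # Group related parameters for readability
--     formatted_lines = []
--     formatted_lines.append(f"{cmd[0]} \\")  # executable
--
--     i = 1
--     while i < len(cmd):
--         param = cmd[i]
--
--         if param.startswith('-'):
--             # Parameter with potential values
--             param_line = f"  {param}"
--
--             # Add values until next parameter or end
--             i += 1
--             while i < len(cmd) and not cmd[i].startswith('-'):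
--                 param_line += f" {cmd[i]}"
--                 i += 1
--
--             param_line += " \\"
--             formatted_lines.append(param_line)
--         else:
--             i += 1
--
--     # Remove trailing backslash
--     if formatted_lines:
--         formatted_lines[-1] = formatted_lines[-1].rstrip(" \\")
--
--     return "\n".join(formatted_lines)
-- ===== SOURCE B (Python) =====
-- def format_command_for_logging(cmd):
--     """Format command for clear logging and debugging."""
--     lines = [cmd[0]]
--     in_param = False
--     for tok in cmd[1:]:
--         if tok.startswith('-'):
--             lines.append("  " + tok)
--             in_param = True
--         elif in_param:
--             lines[-1] += " " + tok
--     return " \\\n".join(lines).rstrip(" \\")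
-- ===== Notes on version B (the rewrite author's own statement) =====
-- stated objective: simpler
-- what changed: Replaced the index-driven outer/inner while-loop pair (which consumes each flag's values in a nested scan and closes each line with ' \') with a single flat for-pass over cmd[1:] keeping an in_param flag and appending values to the last line, the backslash continuations being added once by a ' \\\n'.join and the final rstrip applied to the joined string.
import Mathlib
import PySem

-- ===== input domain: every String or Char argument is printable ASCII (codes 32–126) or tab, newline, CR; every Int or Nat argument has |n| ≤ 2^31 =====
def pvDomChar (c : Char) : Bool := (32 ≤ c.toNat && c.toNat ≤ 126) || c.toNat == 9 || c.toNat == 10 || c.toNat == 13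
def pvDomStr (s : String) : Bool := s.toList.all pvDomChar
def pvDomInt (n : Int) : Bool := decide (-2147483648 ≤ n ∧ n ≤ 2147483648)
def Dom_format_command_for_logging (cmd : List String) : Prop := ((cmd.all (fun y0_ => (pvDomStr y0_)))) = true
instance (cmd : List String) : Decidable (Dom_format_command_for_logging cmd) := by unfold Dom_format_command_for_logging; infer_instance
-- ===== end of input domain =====

-- B replaces A's index-driven nested while-loops with one flat pass keeping an
-- in_param flag, joining the lines with " \\\n" and rstrip-ing the joined string
-- once; objective: simpler (same O(n) cost).


-- shared helpers: exact ports of the Python builtins both sides call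
-- s.rstrip(" \\"): drop trailing ' ' and '\\' characters (exact: rstrip with an
-- explicit char set removes exactly the maximal trailing run of those chars)
def pvRstripSB (cs : List Char) : List Char :=
  ((cs.reverse).dropWhile (fun c => c == ' ' || c == '\\')).reverse

-- tok.startswith('-')
def pvDash (cs : List Char) : Bool := PySem.Chars.startswith cs ['-']

-- lines[-1] = f(lines[-1]) on a Python list of lines (no-op on [])
def pvModLast (f : List Char → List Char) : List (List Char) → List (List Char)
  | [] => []
  | [x] => [f x]
  | x :: y :: ys => x :: pvModLast f (y :: ys)

-- ===== PORT A =====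
-- inner while: param_line += f" {cmd[i]}"; i += 1  until next '-' token or end
def pvInnerA (line : List Char) : List (List Char) → List Char × List (List Char)
  | [] => (line, [])
  | t :: rest => if pvDash t then (line, t :: rest) else pvInnerA (line ++ ' ' :: t) rest

theorem pvInnerA_length (line : List Char) (ts : List (List Char)) :
    (pvInnerA line ts).2.length ≤ ts.length := by
  induction ts generalizing line with
  | nil => simp [pvInnerA]
  | cons t rest ih =>
    simp only [pvInnerA]
    split
    · simp
    · exact le_trans (ih _) (by simp)

-- outer while over i
def pvOuterA (acc : List (List Char)) (ts : List (List Char)) : List (List Char) :=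
  match ts with
  | [] => acc
  | p :: rest =>
    if pvDash p then
      let r := pvInnerA (' ' :: ' ' :: p) rest
      pvOuterA (acc ++ [r.1 ++ [' ', '\\']]) r.2
    else pvOuterA acc rest
termination_by ts.length
decreasing_by
  · exact Nat.lt_succ_of_le (pvInnerA_length _ _)
  · simp

def format_command_for_logging (cmd : List String) : String :=
  match cmd with
  | [] => ""  -- cmd[0] raises IndexError: excluded by Pre_
  | c0 :: rest =>
    let lines := pvOuterA [c0.toList ++ [' ', '\\']] (rest.map String.toList)
    -- formatted_lines is nonempty, so the 'if formatted_lines:' guard always fires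
    String.ofList (PySem.Chars.join ['\n'] (pvModLast pvRstripSB lines))

-- ===== PORT B =====
-- one step of Source B's flat for-loop: state = (lines, in_param)
def pvStepB (st : List (List Char) × Bool) (t : List Char) : List (List Char) × Bool :=
  if pvDash t then (st.1 ++ [' ' :: ' ' :: t], true)
  else if st.2 then (pvModLast (· ++ ' ' :: t) st.1, st.2)
  else st

def format_command_for_logging_alt (cmd : List String) : String :=
  match cmd with
  | [] => ""  -- cmd[0] raises IndexError: excluded by Pre_
  | c0 :: rest =>
    let st := (rest.map String.toList).foldl pvStepB ([c0.toList], false)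
    String.ofList (pvRstripSB (PySem.Chars.join [' ', '\\', '\n'] st.1))

-- ===== PRECONDITION & SPEC =====
-- A evaluates cmd[0] first, so it raises IndexError exactly on the empty list.
def Pre_format_command_for_logging (cmd : List String) : Prop := cmd ≠ []
instance (cmd : List String) : Decidable (Pre_format_command_for_logging cmd) := by
  unfold Pre_format_command_for_logging; infer_instance

def pvWitness_format_command_for_logging : List String := ["prog", "-x", "1"]

def Spec_format_command_for_logging (cmd : List String) (out : String) : Prop := out = format_command_for_logging_alt cmd
instance (cmd : List String) (out : String) : Decidable (Spec_format_command_for_logging cmd out) := by unfold Spec_format_command_for_logging; infer_instance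

-- ===== CLAIM (what is proved, stated in full; the proofs are below) =====
def Claim_equal_format_command_for_logging : Prop := ∀ (cmd : List String), Dom_format_command_for_logging cmd → Pre_format_command_for_logging cmd → Spec_format_command_for_logging cmd (format_command_for_logging cmd)

-- ===== LEMMAS AND PROOFS =====

theorem pvModLast_append_singleton (f : List Char → List Char) (L : List (List Char)) (x : List Char) :
    pvModLast f (L ++ [x]) = L ++ [f x] := by
  induction L with
  | nil => rfl
  | cons a L ih =>
    cases L with
    | nil => rfl
    | cons b L => simpa [pvModLast] using ih

-- the inner while matches Source B's fold while in_param = true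
theorem pvInnerA_foldB (ts : List (List Char)) (L : List (List Char)) (line : List Char) :
    List.foldl pvStepB (L ++ [line], true) ts
      = List.foldl pvStepB (L ++ [(pvInnerA line ts).1], true) (pvInnerA line ts).2 := by
  induction ts generalizing line with
  | nil => simp [pvInnerA]
  | cons t rest ih =>
    by_cases h : pvDash t = true
    · simp [pvInnerA, h]
    · simp only [pvInnerA, h, if_false, List.foldl_cons, pvStepB, Bool.false_eq_true]
      rw [pvModLast_append_singleton]
      exact ih (line ++ ' ' :: t)

-- the inner while stops at end of input or at a '-' token
theorem pvInnerA_head (line : List Char) (ts : List (List Char)) :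
    ((pvInnerA line ts).2).head?.all pvDash = true := by
  induction ts generalizing line with
  | nil => simp [pvInnerA]
  | cons t rest ih =>
    by_cases h : pvDash t = true
    · simp [pvInnerA, h]
    · simpa [pvInnerA, h] using ih (line ++ ' ' :: t)

-- main invariant: A's outer loop over closed lines = (map of) B's fold from in_param = false
theorem pvOuterA_foldB_bounded (n : Nat) : ∀ (ts : List (List Char)), ts.length ≤ n → ∀ (L : List (List Char)),
    pvOuterA (L.map (· ++ [' ', '\\'])) ts
      = (List.foldl pvStepB (L, false) ts).1.map (· ++ [' ', '\\']) := by
  induction n with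
  | zero =>
    intro ts hts L
    have : ts = [] := List.eq_nil_of_length_eq_zero (Nat.le_zero.mp hts)
    subst this; simp [pvOuterA]
  | succ n ih =>
    intro ts hts L
    cases ts with
    | nil => simp [pvOuterA]
    | cons p rest =>
      simp only [List.length_cons, Nat.succ_le_succ_iff] at hts
      by_cases h : pvDash p = true
      · have hlin := pvInnerA_foldB rest L (' ' :: ' ' :: p)
        set r := pvInnerA (' ' :: ' ' :: p) rest with hr
        have hlen : r.2.length ≤ rest.length := pvInnerA_length _ _
        have hfold : (List.foldl pvStepB (L, false) (p :: rest)).1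
            = (List.foldl pvStepB (L ++ [r.1], false) r.2).1 := by
          have h1 : List.foldl pvStepB (L, false) (p :: rest)
              = List.foldl pvStepB (L ++ [r.1], true) r.2 := by
            simpa [pvStepB, h] using hlin
          rw [h1]
          -- from (·, true) and (·, false) the fold's .1 agrees when r.2 is empty
          -- or starts with a '-' token (pvInnerA_head)
          have hhd := pvInnerA_head (' ' :: ' ' :: p) rest
          cases h2 : r.2 with
          | nil => simp
          | cons t tr =>
            rw [← hr, h2] at hhd
            simp only [List.head?_cons, Option.all_some] at hhd
            simp [pvStepB, hhd]
        rw [hfold]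
        have step : pvOuterA (L.map (· ++ [' ', '\\'])) (p :: rest)
            = pvOuterA ((L ++ [r.1]).map (· ++ [' ', '\\'])) r.2 := by
          rw [pvOuterA]; simp [h, ← hr]
        rw [step]
        exact ih r.2 (le_trans hlen hts) (L ++ [r.1])
      · have hstep : pvOuterA (L.map (· ++ [' ', '\\'])) (p :: rest)
            = pvOuterA (L.map (· ++ [' ', '\\'])) rest := by
          rw [pvOuterA]; simp [h]
        rw [hstep]
        simp only [List.foldl_cons, pvStepB, h, Bool.false_eq_true, if_false]
        exact ih rest hts L

theorem pvOuterA_foldB (ts : List (List Char)) (L : List (List Char)) :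
    pvOuterA (L.map (· ++ [' ', '\\'])) ts
      = (List.foldl pvStepB (L, false) ts).1.map (· ++ [' ', '\\']) :=
  pvOuterA_foldB_bounded ts.length ts le_rfl L

-- rstrip(" \\") eats a trailing " \\"
theorem pvRstripSB_close (x : List Char) : pvRstripSB (x ++ [' ', '\\']) = pvRstripSB x := by
  simp [pvRstripSB, List.dropWhile]

-- '\n' blocks rstrip(" \\"): only the last joined line is stripped
theorem pvRstripSB_newline (u v : List Char) :
    pvRstripSB (u ++ '\n' :: v) = u ++ '\n' :: pvRstripSB v := by
  have key : ∀ (a b : List Char), List.dropWhile (fun c => c == ' ' || c == '\\') (a ++ '\n' :: b)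
      = List.dropWhile (fun c => c == ' ' || c == '\\') a ++ '\n' :: b := by
    intro a b
    induction a with
    | nil => simp [List.dropWhile]
    | cons c a ih =>
      by_cases hc : (c == ' ' || c == '\\') = true
      · simpa [List.dropWhile, hc] using ih
      · simp [List.dropWhile, hc]
  simp only [pvRstripSB, List.reverse_append, List.reverse_cons]
  rw [show v.reverse ++ ['\n'] ++ u.reverse = v.reverse ++ '\n' :: u.reverse by simp, key]
  simp

-- final formatting: A's per-line " \\" + rstrip of the LAST LINE equals
-- B's " \\\n"-join + rstrip of the WHOLE STRING
theorem pvJoin_eq (L : List (List Char)) (hL : L ≠ []) :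
    PySem.Chars.join ['\n'] (pvModLast pvRstripSB (L.map (· ++ [' ', '\\'])))
      = pvRstripSB (PySem.Chars.join [' ', '\\', '\n'] L) := by
  induction L with
  | nil => exact absurd rfl hL
  | cons x L ih =>
    cases L with
    | nil =>
      simp [pvModLast, PySem.Chars.join_singleton, pvRstripSB_close]
    | cons y ys =>
      have hjoin : PySem.Chars.join [' ', '\\', '\n'] (x :: y :: ys)
          = x ++ [' ', '\\'] ++ '\n' :: PySem.Chars.join [' ', '\\', '\n'] (y :: ys) := by
        rw [PySem.Chars.join_cons_cons]; simp
      rw [hjoin, pvRstripSB_newline, ← ih (by simp)]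
      cases ys with
      | nil => simp [pvModLast, PySem.Chars.join_cons_cons, PySem.Chars.join_singleton]
      | cons z zs => simp [pvModLast, PySem.Chars.join_cons_cons]

-- ===== VERDICT (by name: the statement is the Claim_ definition above) =====
theorem format_command_for_logging_spec : Claim_equal_format_command_for_logging := by
  intro cmd _ hpre
  unfold Spec_format_command_for_logging
  cases cmd with
  | nil => exact absurd rfl hpre
  | cons c0 rest =>
    show String.ofList (PySem.Chars.join ['\n'] (pvModLast pvRstripSB
          (pvOuterA [c0.toList ++ [' ', '\\']] (rest.map String.toList))))
        = String.ofList (pvRstripSB (PySem.Chars.join [' ', '\\', '\n']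
          (List.foldl pvStepB ([c0.toList], false) (rest.map String.toList)).1))
    have h := pvOuterA_foldB (rest.map String.toList) [c0.toList]
    simp only [List.map_cons, List.map_nil] at h
    rw [h, pvJoin_eq]
    intro hc
    have hlenc := congrArg List.length hc
    simp only [List.length_nil] at hlenc
    have hmono : ∀ (ts : List (List Char)) (st : List (List Char) × Bool),
        st.1.length ≤ (List.foldl pvStepB st ts).1.length := by
      intro ts
      induction ts with
      | nil => intro st; simp
      | cons t tr ihh =>
        intro st
        refine le_trans ?_ (ihh (pvStepB st t))
        unfold pvStepB
        split
        · simp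
        · split
          · have hml : ∀ (g : List Char → List Char) (M : List (List Char)),
                (pvModLast g M).length = M.length := by
              intro g M
              induction M with
              | nil => rfl
              | cons a M ihm =>
                cases M with
                | nil => rfl
                | cons b M => simpa [pvModLast] using ihm
            simp [hml]
          · simp
    have h2 := hmono (rest.map String.toList) ([c0.toList], false)
    rw [hlenc] at h2
    simp at h2
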